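-- pv_equiv track=rewrite | github.com/KubaCeran/Studia | BAL_Projekt_4/methods.py | find_max_number
-- ===== SOURCE A (Python) =====
-- def find_max_number(tab, n):
--     empty_tab = []
--     if tab == empty_tab:
--         return 0, 0, 0
--     else:
--         max_num = tab[0]
--         count = 1
--         index = 0
--         min_dist = n
--         for i in range(1, n):
--             if tab[i] == max_num:
--                 count += 1
--                 temp_dist = i - index
--                 index = i
--                 if temp_dist < min_dist:
--                     min_dist = temp_dist
--             else:
--                 if tab[i] > max_num:
--                     max_num = tab[i]
--                     min_dist = n
--                     count = 1
--                     index = i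
--
--         if count == 1:
--             min_dist = 0
--         return max_num, count, min_dist
-- ===== SOURCE B (Python) =====
-- def find_max_number(tab, n):
--     if tab == []:
--         return 0, 0, 0
--     max_num = tab[0]
--     for i in range(1, n):
--         if tab[i] > max_num:
--             max_num = tab[i]
--     occ = [i for i in range(1, n) if tab[i] == max_num]
--     if max_num == tab[0]:
--         occ = [0] + occ
--     gaps = [b - a for a, b in zip(occ, occ[1:])]
--     min_dist = min(gaps) if gaps else 0
--     return max_num, len(occ), min_dist
-- ===== Notes on version B (the rewrite author's own statement) =====
-- stated objective: alternative
-- what changed: Replaces A's single-pass state machine (running max/count/last-index/min-dist with reset-and-patch logic) by a three-stage pipeline: a max pass, an explicit list of occurrence indices, and the minimum of adjacent gaps via zip.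
import Mathlib
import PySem

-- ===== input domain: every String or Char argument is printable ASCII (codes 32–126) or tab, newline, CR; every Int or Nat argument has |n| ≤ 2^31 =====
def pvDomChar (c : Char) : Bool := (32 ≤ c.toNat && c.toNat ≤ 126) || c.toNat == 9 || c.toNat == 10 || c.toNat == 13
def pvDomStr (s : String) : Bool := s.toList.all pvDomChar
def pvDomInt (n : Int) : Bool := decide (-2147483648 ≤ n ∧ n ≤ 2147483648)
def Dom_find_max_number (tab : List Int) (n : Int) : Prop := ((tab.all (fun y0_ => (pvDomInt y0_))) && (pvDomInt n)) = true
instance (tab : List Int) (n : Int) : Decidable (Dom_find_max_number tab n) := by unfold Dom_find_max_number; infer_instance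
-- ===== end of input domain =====

-- B replaces A's single-pass state machine by a three-stage pipeline (max pass, occurrence-index
-- list, min of adjacent gaps via zip); objective: alternative decomposition, same O(n) cost.

-- ===== PORT A =====
-- loop body of A's for-loop, state = (max_num, count, index, min_dist)
def stepA (tab : List Int) (n : Int) (st : Int × Int × Int × Int) (i : Int) : Int × Int × Int × Int :=
  let ti := PySem.List.pyGetD tab i 0
  if ti = st.1 then
    let temp_dist := i - st.2.2.1
    (st.1, st.2.1 + 1, i, if temp_dist < st.2.2.2 then temp_dist else st.2.2.2)
  else if ti > st.1 then (ti, 1, i, n)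
  else st

def find_max_number (tab : List Int) (n : Int) : Int × Int × Int :=
  if tab = [] then (0, 0, 0)
  else
    let s := (PySem.List.pyRange 1 n 1).foldl (stepA tab n) (PySem.List.pyGetD tab 0 0, 1, 0, n)
    if s.2.1 = 1 then (s.1, s.2.1, 0) else (s.1, s.2.1, s.2.2.2)

-- ===== PORT B =====
def find_max_number_alt (tab : List Int) (n : Int) : Int × Int × Int :=
  if tab = [] then (0, 0, 0)
  else
    let t0 := PySem.List.pyGetD tab 0 0
    let max_num := (PySem.List.pyRange 1 n 1).foldl
      (fun m i => if PySem.List.pyGetD tab i 0 > m then PySem.List.pyGetD tab i 0 else m) t0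
    let occ0 := (PySem.List.pyRange 1 n 1).filter (fun i => PySem.List.pyGetD tab i 0 == max_num)
    let occ := if max_num = t0 then 0 :: occ0 else occ0
    let gaps := (occ.zip (PySem.List.slice occ (some 1) none)).map (fun p => p.2 - p.1)
    let min_dist := if gaps ≠ [] then (PySem.List.min? gaps (fun x => x)).getD 0 else 0
    (max_num, (occ.length : Int), min_dist)

-- ===== PRECONDITION & SPEC =====
-- A raises IndexError when tab is nonempty and n exceeds len(tab); those inputs are excluded.
def Pre_find_max_number (tab : List Int) (n : Int) : Prop := tab = [] ∨ n ≤ (tab.length : Int)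
instance (tab : List Int) (n : Int) : Decidable (Pre_find_max_number tab n) := by
  unfold Pre_find_max_number; infer_instance
def pvWitness_find_max_number : List Int × Int := ([3, 1, 3, 3, 2], 5)

def Spec_find_max_number (tab : List Int) (n : Int) (out : Int × Int × Int) : Prop := out = find_max_number_alt tab n
instance (tab : List Int) (n : Int) (out : Int × Int × Int) : Decidable (Spec_find_max_number tab n out) := by unfold Spec_find_max_number; infer_instance

-- ===== CLAIM (what is proved, stated in full; the proofs are below) =====
def Claim_equal_find_max_number : Prop := ∀ (tab : List Int) (n : Int), Dom_find_max_number tab n → Pre_find_max_number tab n → Spec_find_max_number tab n (find_max_number tab n)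

-- ===== LEMMAS AND PROOFS =====

-- value at index, proof-side abbreviation
def vP (tab : List Int) (i : Int) : Int := PySem.List.pyGetD tab i 0

-- running max over tab[1:m] together with tab[0]
def mxP (tab : List Int) (m : Int) : Int :=
  (PySem.List.pyRange 1 m 1).foldl (fun a i => if vP tab i > a then vP tab i else a) (vP tab 0)

-- occurrence-index list of the prefix max
def occP (tab : List Int) (m : Int) : List Int :=
  (if mxP tab m = vP tab 0 then [0] else []) ++
    (PySem.List.pyRange 1 m 1).filter (fun i => vP tab i == mxP tab m)

-- adjacent gaps
def gapsA : List Int → List Int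
  | [] => []
  | [_] => []
  | a :: b :: t => (b - a) :: gapsA (b :: t)

def dOf (tab : List Int) (n m : Int) : Int :=
  match gapsA (occP tab m) with
  | [] => n
  | g :: gs => gs.foldl min g

theorem gaps_zip (l : List Int) :
    (l.zip l.tail).map (fun p => p.2 - p.1) = gapsA l := by
  induction l with
  | nil => simp [gapsA]
  | cons a t ih =>
    cases t with
    | nil => simp [gapsA]
    | cons b t' => simpa [gapsA] using ih

theorem gapsA_append (l : List Int) (h : l ≠ []) (x : Int) :
    gapsA (l ++ [x]) = gapsA l ++ [x - l.getLastD 0] := by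
  induction l with
  | nil => simp at h
  | cons a t ih =>
    cases t with
    | nil => simp [gapsA]
    | cons b t' =>
      have := ih (by simp)
      simp [gapsA] at this ⊢
      simpa [List.getLastD_cons] using this

theorem gapsA_eq_nil_iff (l : List Int) : gapsA l = [] ↔ l.length ≤ 1 := by
  match l with
  | [] => simp [gapsA]
  | [a] => simp [gapsA]
  | a :: b :: t => simp [gapsA]

theorem mx_ge (tab : List Int) (m : Int) :
    vP tab 0 ≤ mxP tab m ∧ ∀ i ∈ PySem.List.pyRange 1 m 1, vP tab i ≤ mxP tab m := by
  have hfun : (fun (a i : Int) => if vP tab i > a then vP tab i else a)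
      = (fun (a i : Int) => max a (vP tab i)) := by
    funext a i; by_cases h : vP tab i > a <;> simp [max_def, h] <;> omega
  rw [mxP, hfun]
  exact PySem.List.le_foldl_max_int _ _ _

theorem mxP_eq_map (tab : List Int) (m : Int) :
    mxP tab m = ((PySem.List.pyRange 1 m 1).map (vP tab)).foldl max (vP tab 0) := by
  have hfun : (fun (a i : Int) => if vP tab i > a then vP tab i else a)
      = (fun (a i : Int) => max a (vP tab i)) := by
    funext a i; by_cases h : vP tab i > a <;> simp [max_def, h] <;> omega
  rw [mxP, hfun, List.foldl_map]

theorem occP_ne_nil (tab : List Int) (m : Int) : occP tab m ≠ [] := by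
  by_cases h0 : mxP tab m = vP tab 0
  · simp [occP, h0]
  · rcases PySem.List.foldl_max_mem ((PySem.List.pyRange 1 m 1).map (vP tab)) (vP tab 0) with h | h
    · exact absurd (by rw [mxP_eq_map, h]) h0
    · rw [← mxP_eq_map] at h
      rcases List.mem_map.mp h with ⟨i, hi, hvi⟩
      have : i ∈ (PySem.List.pyRange 1 m 1).filter (fun i => vP tab i == mxP tab m) :=
        List.mem_filter.mpr ⟨hi, by simp [hvi]⟩
      simp only [occP, h0]
      intro hc
      rw [List.append_eq_nil_iff] at hc
      rw [hc.2] at this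
      exact absurd this (List.not_mem_nil)

theorem occP_bounds (tab : List Int) (m : Int) (h1 : 1 ≤ m) :
    ∀ x ∈ occP tab m, 0 ≤ x ∧ x < m := by
  intro x hx
  rcases List.mem_append.mp hx with h | h
  · rcases (by split at h <;> simp_all : x = 0) with rfl; omega
  · have := List.mem_filter.mp h |>.1
    have := (PySem.List.mem_pyRange_one).mp this
    omega

theorem getLastD_mem (l : List Int) (d : Int) (h : l ≠ []) : l.getLastD d ∈ l := by
  induction l with
  | nil => exact absurd rfl h
  | cons a t ih =>
    cases t with
    | nil => simp
    | cons b t' => simpa [List.getLastD_cons] using Or.inr (ih (by simp))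

theorem mxP_succ (tab : List Int) (m : Int) (h1 : 1 ≤ m) :
    mxP tab (m + 1) = if vP tab m > mxP tab m then vP tab m else mxP tab m := by
  rw [mxP, PySem.List.pyRange_one_succ_right h1, List.foldl_append]
  rfl

theorem occP_succ (tab : List Int) (m : Int) (h1 : 1 ≤ m) :
    occP tab (m + 1) =
      (if mxP tab (m + 1) = vP tab 0 then [0] else []) ++
        ((PySem.List.pyRange 1 m 1).filter (fun i => vP tab i == mxP tab (m + 1)) ++
          (if vP tab m == mxP tab (m + 1) then [m] else [])) := by
  rw [occP, PySem.List.pyRange_one_succ_right h1, List.filter_append]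
  cases h : vP tab m == mxP tab (m + 1) <;> simp [List.filter, h]

theorem inv_aux (tab : List Int) (n : Int) (k : Nat) (hkn : 1 + (k : Int) ≤ n) :
    (PySem.List.pyRange 1 (1 + (k : Int)) 1).foldl (stepA tab n) (vP tab 0, 1, 0, n)
      = (mxP tab (1 + (k : Int)), ((occP tab (1 + (k : Int))).length : Int),
         (occP tab (1 + (k : Int))).getLastD 0, dOf tab n (1 + (k : Int))) := by
  induction k with
  | zero =>
    have hmx : mxP tab 1 = vP tab 0 := by
      simp [mxP, PySem.List.pyRange_one_eq_nil (by omega : (1:Int) ≤ 1)]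
    simp [PySem.List.pyRange_one_eq_nil (by omega : (1:Int) ≤ 1), occP, dOf, hmx, gapsA]
  | succ k ih =>
    have h1 : (1:Int) ≤ 1 + (k:Int) := by omega
    set m : Int := 1 + (k : Int) with hm
    have hms : 1 + ((k:Nat).succ : Int) = m + 1 := by push_cast; omega
    rw [hms, PySem.List.pyRange_one_succ_right h1, List.foldl_append,
        ih (by omega)]
    have hb := occP_bounds tab m h1
    have hne := occP_ne_nil tab m
    have hlast := hb _ (getLastD_mem (occP tab m) 0 hne)
    have hvm : PySem.List.pyGetD tab m 0 = vP tab m := rfl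
    rcases lt_trichotomy (vP tab m) (mxP tab m) with hc | hc | hc
    · -- smaller: state unchanged, occ unchanged
      have hmx : mxP tab (m + 1) = mxP tab m := by rw [mxP_succ tab m h1]; simp; omega
      have hocc : occP tab (m + 1) = occP tab m := by
        rw [occP_succ tab m h1, hmx, occP]
        simp [show ¬ vP tab m = mxP tab m by omega]
      simp [List.foldl, stepA, hvm, show ¬ vP tab m = mxP tab m by omega,
            show ¬ vP tab m > mxP tab m by omega, hmx, hocc, dOf]
    · -- equal: append occurrence
      have hmx : mxP tab (m + 1) = mxP tab m := by rw [mxP_succ tab m h1]; simp; omega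
      have hocc : occP tab (m + 1) = occP tab m ++ [m] := by
        rw [occP_succ tab m h1, hmx, occP, hc]
        simp [List.append_assoc]
      have hg : gapsA (occP tab (m + 1)) = gapsA (occP tab m) ++ [m - (occP tab m).getLastD 0] := by
        rw [hocc]; exact gapsA_append _ hne _
      have hdn : dOf tab n (m + 1) =
          (if m - (occP tab m).getLastD 0 < dOf tab n m then m - (occP tab m).getLastD 0
           else dOf tab n m) := by
        rw [dOf, hg]
        rcases hgo : gapsA (occP tab m) with _ | ⟨g, gs⟩
        · simp [dOf, hgo, List.getLastD_eq_getLast?] at hlast ⊢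
          omega
        · rw [dOf, hgo]
          simp only [List.cons_append, List.foldl_append, List.foldl_cons, List.foldl_nil]
          split_ifs <;> omega
      simp [List.foldl, stepA, hvm, hc, hmx, hocc, hdn]
    · -- larger: reset
      have hmx : mxP tab (m + 1) = vP tab m := by rw [mxP_succ tab m h1]; simp; omega
      have hv0 : vP tab 0 ≤ mxP tab m := (mx_ge tab m).1
      have hall := (mx_ge tab m).2
      have hocc : occP tab (m + 1) = [m] := by
        rw [occP_succ tab m h1, hmx]
        rw [if_neg (by omega), List.filter_eq_nil_iff.mpr, if_pos (by simp)]
        · simp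
        · intro i hi
          have := hall i hi
          simp; omega
      simp [List.foldl, stepA, hvm, show ¬ vP tab m = mxP tab m by omega, hc,
            hmx, hocc, dOf, gapsA]

theorem inv (tab : List Int) (n : Int) (m : Int) (h1 : 1 ≤ m) (h2 : m ≤ n) :
    (PySem.List.pyRange 1 m 1).foldl (stepA tab n) (vP tab 0, 1, 0, n)
      = (mxP tab m, ((occP tab m).length : Int), (occP tab m).getLastD 0, dOf tab n m) := by
  have hm : m = 1 + ((m - 1).toNat : Int) := by omega
  rw [hm]
  exact inv_aux tab n (m - 1).toNat (by omega)

-- ===== VERDICT (by name: the statement is the Claim_ definition above) =====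
theorem find_max_number_spec : Claim_equal_find_max_number := by
  intro tab n _ _
  unfold Spec_find_max_number find_max_number find_max_number_alt
  by_cases ht : tab = []
  · simp [ht]
  · rw [if_neg ht, if_neg ht]
    by_cases hn : n ≤ 1
    · simp [PySem.List.pyRange_one_eq_nil hn, PySem.List.slice_from_one]
    · have hv0 : PySem.List.pyGetD tab 0 0 = vP tab 0 := rfl
      rw [hv0, inv tab n n (by omega) (le_refl n)]
      have hbmx : ((PySem.List.pyRange 1 n 1).foldl
          (fun m i => if PySem.List.pyGetD tab i 0 > m then PySem.List.pyGetD tab i 0 else m)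
          (vP tab 0)) = mxP tab n := rfl
      have hbocc : (if mxP tab n = vP tab 0 then
            (0 : Int) :: (PySem.List.pyRange 1 n 1).filter (fun i => PySem.List.pyGetD tab i 0 == mxP tab n)
          else (PySem.List.pyRange 1 n 1).filter (fun i => PySem.List.pyGetD tab i 0 == mxP tab n))
          = occP tab n := by
        unfold occP
        split_ifs <;> rfl
      have hgaps : ∀ l : List Int,
          (l.zip (PySem.List.slice l (some 1) none)).map (fun p => p.2 - p.1) = gapsA l := by
        intro l; rw [PySem.List.slice_from_one, gaps_zip]
      simp only [hbmx, hbocc, hgaps]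
      by_cases hlen : (occP tab n).length = 1
      · have hgnil : gapsA (occP tab n) = [] := (gapsA_eq_nil_iff _).mpr (by omega)
        simp [hlen, hgnil]
      · have hge : 1 ≤ (occP tab n).length :=
          List.length_pos_iff.mpr (occP_ne_nil tab n)
        have hgne : ¬ gapsA (occP tab n) = [] := by
          rw [gapsA_eq_nil_iff]; omega
        rcases hgo : gapsA (occP tab n) with _ | ⟨g, gs⟩
        · exact absurd hgo hgne
        · have hcast : ¬ ((occP tab n).length : Int) = 1 := by
            intro h; exact hlen (by exact_mod_cast h)
          simp [hcast, hgo, dOf, PySem.List.min?_id_cons]
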